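-- pv_equiv track=rewrite | github.com/streamlit/st-issues | app/utils/agent_wiki.py | extract_markdown_title
-- ===== SOURCE A (Python) =====
-- def extract_markdown_title(markdown_content: str) -> tuple[str | None, str]:
--     lines = markdown_content.splitlines()
--     content_without_title: list[str] = []
--     title: str | None = None
--     title_found = False
--
--     for line in lines:
--         if not title_found and line.startswith("# "):
--             title = line[2:].strip()
--             title_found = True
--             continue
--         content_without_title.append(line)
--
--     return title, "\n".join(content_without_title)
-- ===== SOURCE B (Python) =====
-- def extract_markdown_title(markdown_content: str) -> tuple[str | None, str]:
--     lines = markdown_content.splitlines()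
--     for i, line in enumerate(lines):
--         if line.startswith("# "):
--             return line[2:].strip(), "\n".join(lines[:i] + lines[i + 1:])
--     return None, "\n".join(lines)
-- ===== Notes on version B (the rewrite author's own statement) =====
-- stated objective: simpler
-- what changed: Replaces the flag-gated accumulator loop with a search for the first H1 line, returning its stripped text and the join of the lines with that single line removed.
import Mathlib
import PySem

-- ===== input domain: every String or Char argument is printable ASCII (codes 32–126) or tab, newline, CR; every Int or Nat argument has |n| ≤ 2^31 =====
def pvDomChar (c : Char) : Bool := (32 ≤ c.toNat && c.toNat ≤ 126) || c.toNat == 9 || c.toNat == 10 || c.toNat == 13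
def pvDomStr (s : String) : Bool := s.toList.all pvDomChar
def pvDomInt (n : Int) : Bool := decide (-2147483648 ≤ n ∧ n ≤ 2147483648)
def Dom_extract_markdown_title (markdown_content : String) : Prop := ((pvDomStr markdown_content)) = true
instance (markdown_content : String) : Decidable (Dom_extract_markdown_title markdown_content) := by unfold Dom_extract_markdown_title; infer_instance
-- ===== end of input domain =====

-- B replaces A's flag-gated accumulator loop by a search for the first H1 line,
-- then joins the remaining lines; objective: simpler decomposition.


-- ===== PORT A =====
-- one step of A's loop over state (content_without_title, title, title_found)
def emtStep (st : List String × Option String × Bool) (line : String) :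
    List String × Option String × Bool :=
  if !st.2.2 && PySem.Str.startswith line "# " then
    (st.1, some (PySem.Str.strip (PySem.Str.slice line (some 2) none)), true)
  else
    (st.1 ++ [line], st.2.1, st.2.2)

def extract_markdown_title (markdown_content : String) : Option String × String :=
  let lines := PySem.Str.splitlines markdown_content
  let st := lines.foldl emtStep ([], none, false)
  (st.2.1, PySem.Str.join "\n" st.1)

-- ===== PORT B =====
-- search for the first H1 line, keeping the already-seen prefix (reversed)
def emtGo (pre : List String) : List String → Option String × String
  | [] => (none, PySem.Str.join "\n" pre.reverse)
  | line :: rest =>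
    if PySem.Str.startswith line "# " then
      (some (PySem.Str.strip (PySem.Str.slice line (some 2) none)),
       PySem.Str.join "\n" (pre.reverse ++ rest))
    else
      emtGo (line :: pre) rest

def extract_markdown_title_alt (markdown_content : String) : Option String × String :=
  emtGo [] (PySem.Str.splitlines markdown_content)

-- ===== PRECONDITION & SPEC =====
def Spec_extract_markdown_title (markdown_content : String) (out : Option String × String) : Prop := out = extract_markdown_title_alt markdown_content
instance (markdown_content : String) (out : Option String × String) : Decidable (Spec_extract_markdown_title markdown_content out) := by unfold Spec_extract_markdown_title; infer_instance

-- ===== CLAIM (what is proved, stated in full; the proofs are below) =====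
def Claim_equal_extract_markdown_title : Prop := ∀ (markdown_content : String), Dom_extract_markdown_title markdown_content → Spec_extract_markdown_title markdown_content (extract_markdown_title markdown_content)

-- ===== LEMMAS AND PROOFS =====

-- once the flag is true, A's loop just appends every remaining line
lemma emt_fold_true (rest : List String) : ∀ (acc : List String) (t : Option String),
    rest.foldl emtStep (acc, t, true) = (acc ++ rest, t, true) := by
  induction rest with
  | nil => intro acc t; simp
  | cons line rest ih =>
    intro acc t
    simp [List.foldl, emtStep, ih]

-- relate A's fold (flag still false) to B's search
lemma emt_fold_eq (rest : List String) : ∀ (pre : List String),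
    (let st := rest.foldl emtStep (pre.reverse, none, false)
     ((st.2.1, PySem.Str.join "\n" st.1) : Option String × String)) = emtGo pre rest := by
  induction rest with
  | nil => intro pre; simp [emtGo]
  | cons line rest ih =>
    intro pre
    by_cases h : PySem.Str.startswith line "# " = true
    · have h' : PySem.Chars.startswith line.toList ['#', ' '] = true := by simpa using h
      simp [List.foldl, emtStep, emtGo, h, h', emt_fold_true]
    · have := ih (line :: pre)
      have h' : ¬ PySem.Chars.startswith line.toList ['#', ' '] = true := by simpa using h
      simpa [List.foldl, emtStep, emtGo, h, h', List.reverse_cons] using this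

-- ===== VERDICT (by name: the statement is the Claim_ definition above) =====
theorem extract_markdown_title_spec : Claim_equal_extract_markdown_title := by
  intro s _
  unfold Spec_extract_markdown_title extract_markdown_title extract_markdown_title_alt
  simpa using emt_fold_eq (PySem.Str.splitlines s) []
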